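-- pv_equiv track=rewrite | github.com/jiyoungzero/2023-Codingtest-Study | jiyoung풀이/PGS문제/pgs_zerobase적절한보상.py | solution
-- ===== SOURCE A (Python) =====
-- def solution(scores):
--     chocos = [1 for _ in range(len(scores))]
--
--     for i in range(len(scores) - 1):
--         if scores[i+1] > scores[i]:
--             chocos[i+1] = chocos[i] + 1
--
--     for i in range(len(scores)-2, -1, -1):
--         if scores[i+1] < scores[i]:
--             chocos[i] = max(chocos[i+1] + 1, chocos[i])
--     return chocos
-- ===== SOURCE B (Python) =====
-- def solution(scores):
--     # Each entry is computed independently, by directly measuring (recursively)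
--     # the strictly increasing run ending at i and the strictly decreasing run
--     # starting at i; no shared array and no sequential passes.
--     def up(i):
--         return up(i - 1) + 1 if i > 0 and scores[i] > scores[i - 1] else 1
--     def down(i):
--         return down(i + 1) + 1 if i + 1 < len(scores) and scores[i] > scores[i + 1] else 1
--     return [max(up(i), down(i)) for i in range(len(scores))]
-- ===== Notes on version B (the rewrite author's own statement) =====
-- stated objective: alternative
-- what changed: B computes every output entry independently by direct recursive measurement of the increasing run ending at that index and the decreasing run starting there, with no shared array and no sequential passes, instead of A's two in-place DP passes over one array.
import Mathlib
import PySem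

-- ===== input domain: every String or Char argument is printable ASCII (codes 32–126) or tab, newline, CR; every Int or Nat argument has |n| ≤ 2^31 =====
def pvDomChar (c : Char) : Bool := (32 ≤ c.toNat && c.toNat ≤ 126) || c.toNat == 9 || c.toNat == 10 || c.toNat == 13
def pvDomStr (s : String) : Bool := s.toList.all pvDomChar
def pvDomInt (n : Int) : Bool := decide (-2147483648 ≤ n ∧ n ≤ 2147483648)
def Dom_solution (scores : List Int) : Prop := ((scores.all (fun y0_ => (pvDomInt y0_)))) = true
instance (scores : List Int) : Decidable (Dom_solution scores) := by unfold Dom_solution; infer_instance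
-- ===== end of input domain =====

-- B computes every entry independently by recursive measurement of the increasing run ending at
-- that index and the decreasing run starting there (no shared array, no sequential passes),
-- instead of A's two in-place DP passes over one array (alternative decomposition).

-- ===== PORT A =====
-- loop body of A's forward pass (chocos[i+1] = chocos[i] + 1 when rising)
def fwdStep (scores : List Int) (ch : List Int) (i : Int) : List Int :=
  if PySem.List.pyGetD scores (i + 1) 0 > PySem.List.pyGetD scores i 0 then
    PySem.List.pySetD ch (i + 1) (PySem.List.pyGetD ch i 0 + 1)
  else ch

-- loop body of A's backward pass (chocos[i] = max(chocos[i+1]+1, chocos[i]) when falling)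
def bwdStep (scores : List Int) (ch : List Int) (i : Int) : List Int :=
  if PySem.List.pyGetD scores (i + 1) 0 < PySem.List.pyGetD scores i 0 then
    PySem.List.pySetD ch i (max (PySem.List.pyGetD ch (i + 1) 0 + 1) (PySem.List.pyGetD ch i 0))
  else ch

def solution (scores : List Int) : List Int :=
  let n : Int := scores.length
  let chocos := (PySem.List.pyRange 0 n 1).map (fun _ => (1 : Int))
  let chocos := (PySem.List.pyRange 0 (n - 1) 1).foldl (fwdStep scores) chocos
  (PySem.List.pyRange (n - 2) (-1) (-1)).foldl (bwdStep scores) chocos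

-- ===== PORT B =====
-- Source B's `up(i)`: recursion on i; all indexing is at proven-in-range nonnegative indices,
-- so plain List.getD is exact
def upB (scores : List Int) : Nat → Int
  | 0 => 1
  | i + 1 => if scores.getD (i + 1) 0 > scores.getD i 0 then upB scores i + 1 else 1

-- Source B's `down(i)`: recursion towards the end of the list
def downB (scores : List Int) (i : Nat) : Int :=
  if h : i + 1 < scores.length ∧ scores.getD i 0 > scores.getD (i + 1) 0 then
    downB scores (i + 1) + 1
  else 1
termination_by scores.length - i
decreasing_by omega

def solution_alt (scores : List Int) : List Int :=
  (List.range scores.length).map (fun i => max (upB scores i) (downB scores i))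

-- ===== PRECONDITION & SPEC =====
def Spec_solution (scores : List Int) (out : List Int) : Prop := out = solution_alt scores
instance (scores : List Int) (out : List Int) : Decidable (Spec_solution scores out) := by unfold Spec_solution; infer_instance

-- ===== CLAIM (what is proved, stated in full; the proofs are below) =====
def Claim_equal_solution : Prop := ∀ (scores : List Int), Dom_solution scores → Spec_solution scores (solution scores)

-- ===== LEMMAS AND PROOFS =====

-- proof-only run tables characterising A's two passes
def runsFrom (prev v : Int) : List Int → List Int
  | [] => []
  | x :: t =>
    let w := if x > prev then v + 1 else 1
    w :: runsFrom x w t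

def runs : List Int → List Int
  | [] => []
  | x :: t => 1 :: runsFrom x 1 t

def altOld (s : List Int) : List Int :=
  ((runs s).zip ((runs s.reverse).reverse)).map (fun p => max p.1 p.2)

theorem length_runsFrom (t : List Int) : ∀ (p v : Int), (runsFrom p v t).length = t.length := by
  induction t with
  | nil => intro p v; rfl
  | cons x t ih => intro p v; simp [runsFrom, ih]

theorem length_runs (s : List Int) : (runs s).length = s.length := by
  cases s with
  | nil => rfl
  | cons x t => simp [runs, length_runsFrom]

theorem mem_runsFrom_ge_one (t : List Int) : ∀ (p v : Int), 1 ≤ v → ∀ w ∈ runsFrom p v t, 1 ≤ w := by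
  induction t with
  | nil => intro p v _ w hw; simp [runsFrom] at hw
  | cons x t ih =>
    intro p v hv w hw
    simp only [runsFrom, List.mem_cons] at hw
    rcases hw with h | h
    · subst h; split <;> omega
    · exact ih x _ (by split <;> omega) w h

theorem runs_ge_one (s : List Int) (i : Nat) (h : i < s.length) : 1 ≤ (runs s).getD i 0 := by
  have hl : i < (runs s).length := by rw [length_runs]; exact h
  rw [List.getD_eq_getElem _ _ hl]
  have hm : (runs s)[i] ∈ runs s := List.getElem_mem hl
  cases s with
  | nil => simp at h
  | cons x t =>
    simp only [runs, List.mem_cons] at hm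
    rcases hm with h' | h'
    · exact le_of_eq h'.symm
    · exact mem_runsFrom_ge_one t x 1 le_rfl _ h'

theorem runsFrom_succ (t : List Int) : ∀ (p v : Int) (i : Nat), i + 1 < t.length →
    (runsFrom p v t).getD (i + 1) 0 =
      if t.getD (i + 1) 0 > t.getD i 0 then (runsFrom p v t).getD i 0 + 1 else 1 := by
  induction t with
  | nil => intro p v i h; simp at h
  | cons x t ih =>
    intro p v i h
    cases i with
    | zero =>
      cases t with
      | nil => simp at h
      | cons y t' => simp [runsFrom]
    | succ j =>
      simp only [runsFrom, List.getD_cons_succ]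
      exact ih x _ j (by simpa using h)

theorem runs_succ (s : List Int) (i : Nat) (h : i + 1 < s.length) :
    (runs s).getD (i + 1) 0 =
      if s.getD (i + 1) 0 > s.getD i 0 then (runs s).getD i 0 + 1 else 1 := by
  cases s with
  | nil => simp at h
  | cons x t =>
    cases i with
    | zero =>
      cases t with
      | nil => simp at h
      | cons y t' => simp [runs, runsFrom]
    | succ j =>
      simp only [runs, List.getD_cons_succ]
      exact runsFrom_succ t x 1 j (by simpa using h)

theorem runs_zero (s : List Int) (h : s ≠ []) : (runs s).getD 0 0 = 1 := by
  cases s with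
  | nil => exact absurd rfl h
  | cons x t => rfl

theorem getD_reverse (l : List Int) (i : Nat) (h : i < l.length) :
    l.reverse.getD i 0 = l.getD (l.length - 1 - i) 0 := by
  rw [List.getD_eq_getElem _ _ (by simpa using h),
      List.getD_eq_getElem _ _ (by omega), List.getElem_reverse]

theorem down_length (s : List Int) : ((runs s.reverse).reverse).length = s.length := by
  simp [length_runs]

theorem down_getD (s : List Int) (i : Nat) (h : i < s.length) :
    ((runs s.reverse).reverse).getD i 0 = (runs s.reverse).getD (s.length - 1 - i) 0 := by
  rw [getD_reverse _ i (by simp [length_runs]; omega), length_runs, List.length_reverse]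

theorem down_ge_one (s : List Int) (i : Nat) (h : i < s.length) :
    1 ≤ ((runs s.reverse).reverse).getD i 0 := by
  rw [down_getD s i h]
  exact runs_ge_one _ _ (by simp; omega)

theorem down_last (s : List Int) (h : 0 < s.length) :
    ((runs s.reverse).reverse).getD (s.length - 1) 0 = 1 := by
  rw [down_getD s (s.length - 1) (Nat.sub_lt h Nat.one_pos)]
  have : s.length - 1 - (s.length - 1) = 0 := by omega
  rw [this]
  exact runs_zero _ (List.length_pos_iff.mp (by simpa using h))

theorem down_succ (s : List Int) (i : Nat) (h : i + 1 < s.length) :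
    ((runs s.reverse).reverse).getD i 0 =
      if s.getD i 0 > s.getD (i + 1) 0 then ((runs s.reverse).reverse).getD (i + 1) 0 + 1 else 1 := by
  have hn : 0 < s.length := by omega
  rw [down_getD s i (by omega), down_getD s (i + 1) h]
  have hj : s.length - 1 - i = (s.length - 1 - (i + 1)) + 1 := by omega
  rw [hj, runs_succ s.reverse _ (by simp; omega)]
  have h1 : s.reverse.getD (s.length - 1 - (i + 1) + 1) 0 = s.getD i 0 := by
    rw [getD_reverse s _ (by omega)]
    congr 1; omega
  have h2 : s.reverse.getD (s.length - 1 - (i + 1)) 0 = s.getD (i + 1) 0 := by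
    rw [getD_reverse s _ (by omega)]
    congr 1; omega
  rw [h1, h2]

theorem altOld_length (s : List Int) : (altOld s).length = s.length := by
  simp [altOld, length_runs]

theorem altOld_getD (s : List Int) (i : Nat) (h : i < s.length) :
    (altOld s).getD i 0 =
      max ((runs s).getD i 0) (((runs s.reverse).reverse).getD i 0) := by
  have hz : i < ((runs s).zip ((runs s.reverse).reverse)).length := by
    simp [length_runs]; omega
  rw [altOld, List.getD_eq_getElem _ _ (by simpa using hz), List.getElem_map, List.getElem_zip,
      List.getD_eq_getElem _ _ (by rw [length_runs]; exact h),
      List.getD_eq_getElem _ _ (by rw [down_length]; exact h)]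

theorem eq_of_getD (a b : List Int) (hl : a.length = b.length)
    (h : ∀ i : Nat, i < a.length → a.getD i 0 = b.getD i 0) : a = b := by
  apply List.ext_getElem hl
  intro i h1 h2
  have := h i h1
  rwa [List.getD_eq_getElem _ _ h1, List.getD_eq_getElem _ _ h2] at this

theorem getD_set (l : List Int) (n : Nat) (v : Int) (i : Nat) (hi : i < l.length) :
    (l.set n v).getD i 0 = if n = i then v else l.getD i 0 := by
  rw [List.getD_eq_getElem _ _ (by simpa using hi), List.getElem_set,
      List.getD_eq_getElem _ _ hi]

theorem fwd_loop (s : List Int) : ∀ (d k : Nat) (c : List Int), k + d + 1 = s.length →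
    c.length = s.length →
    (∀ i : Nat, i < s.length → i ≤ k → c.getD i 0 = (runs s).getD i 0) →
    (∀ i : Nat, i < s.length → k < i → c.getD i 0 = 1) →
    (PySem.List.pyRange (k : Int) ((s.length : Int) - 1) 1).foldl (fwdStep s) c = runs s := by
  intro d
  induction d with
  | zero =>
    intro k c hk hc h1 h2
    rw [PySem.List.pyRange_one_eq_nil (by omega)]
    exact eq_of_getD c (runs s) (by rw [hc, length_runs]) (fun i hi => by
      rw [hc] at hi; exact h1 i hi (by omega))
  | succ d ih =>
    intro k c hk hc h1 h2
    rw [PySem.List.pyRange_one_cons (by omega), List.foldl_cons]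
    have hk1 : k + 1 < s.length := by omega
    have hkc : ((k : Nat) : Int) + 1 = ((k + 1 : Nat) : Int) := by push_cast; ring
    have hstep : fwdStep s c (k : Int) =
        if s.getD (k + 1) 0 > s.getD k 0 then c.set (k + 1) (c.getD k 0 + 1) else c := by
      simp only [fwdStep]
      rw [hkc]
      simp only [PySem.List.pyGetD_natCast, PySem.List.pySetD_natCast]
    rw [hstep, hkc]
    apply ih (k + 1) _ (by omega)
    · split_ifs <;> simp [hc]
    · intro i hi hik
      rcases Nat.lt_or_ge i (k + 1) with hlt | hge
      · have hik' : i ≤ k := by omega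
        split_ifs with hcond
        · rw [getD_set c (k + 1) _ i (by omega), if_neg (by omega)]
          exact h1 i hi hik'
        · exact h1 i hi hik'
      · have hieq : i = k + 1 := by omega
        subst hieq
        rw [runs_succ s k hk1]
        split_ifs with hcond
        · rw [getD_set c (k + 1) _ (k + 1) (by omega), if_pos rfl, h1 k (by omega) le_rfl]
        · exact h2 (k + 1) hi (by omega)
    · intro i hi hik
      split_ifs with hcond
      · rw [getD_set c (k + 1) _ i (by omega), if_neg (by omega)]
        exact h2 i hi (by omega)
      · exact h2 i hi (by omega)

theorem bwd_loop (s : List Int) : ∀ (k : Nat) (c : List Int), k < s.length →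
    c.length = s.length →
    (∀ i : Nat, i < s.length → i < k → c.getD i 0 = (runs s).getD i 0) →
    (∀ i : Nat, i < s.length → k ≤ i → c.getD i 0 = (altOld s).getD i 0) →
    (PySem.List.pyRange ((k : Int) - 1) (-1) (-1)).foldl (bwdStep s) c = altOld s := by
  intro k
  induction k with
  | zero =>
    intro c hk hc h1 h2
    rw [show ((0 : Nat) : Int) - 1 = -1 by norm_num, PySem.List.pyRange_neg_one_eq_nil le_rfl]
    exact eq_of_getD c (altOld s) (by rw [hc, altOld_length]) (fun i hi => by
      rw [hc] at hi; exact h2 i hi (Nat.zero_le i))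
  | succ k ih =>
    intro c hk hc h1 h2
    have hcast : ((k + 1 : Nat) : Int) - 1 = (k : Int) := by push_cast; ring
    rw [hcast, PySem.List.pyRange_neg_one_cons (by omega), List.foldl_cons]
    have hkc : ((k : Nat) : Int) + 1 = ((k + 1 : Nat) : Int) := by push_cast; ring
    have hstep : bwdStep s c (k : Int) =
        if s.getD (k + 1) 0 < s.getD k 0 then
          c.set k (max (c.getD (k + 1) 0 + 1) (c.getD k 0)) else c := by
      simp only [bwdStep]
      rw [hkc]
      simp only [PySem.List.pyGetD_natCast, PySem.List.pySetD_natCast]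
    rw [hstep]
    apply ih _ (by omega)
    · split_ifs <;> simp [hc]
    · intro i hi hik
      split_ifs with hcond
      · rw [getD_set c k _ i (by omega), if_neg (by omega)]
        exact h1 i hi (by omega)
      · exact h1 i hi (by omega)
    · intro i hi hik
      rcases Nat.lt_or_ge i (k + 1) with hlt | hge
      · have hieq : i = k := by omega
        subst hieq
        have hck : c.getD i 0 = (runs s).getD i 0 := h1 i hi (by omega)
        have hck1 : c.getD (i + 1) 0 = (altOld s).getD (i + 1) 0 := h2 (i + 1) (by omega) (by omega)
        have halt1 : (altOld s).getD (i + 1) 0 =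
            max ((runs s).getD (i + 1) 0) (((runs s.reverse).reverse).getD (i + 1) 0) :=
          altOld_getD s (i + 1) (by omega)
        have halt0 : (altOld s).getD i 0 =
            max ((runs s).getD i 0) (((runs s.reverse).reverse).getD i 0) := altOld_getD s i hi
        have hup : 1 ≤ (runs s).getD i 0 := runs_ge_one s i hi
        have hdn1 : 1 ≤ ((runs s.reverse).reverse).getD (i + 1) 0 := down_ge_one s (i + 1) (by omega)
        have hdsucc := down_succ s i (by omega)
        have hrsucc := runs_succ s i (by omega)
        split_ifs with hcond
        · rw [getD_set c i _ i (by omega), if_pos rfl, hck, hck1, halt1, halt0]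
          rw [if_pos (by omega)] at hdsucc
          rw [if_neg (by omega)] at hrsucc
          rw [hdsucc, hrsucc]
          simp only [max_def]
          split_ifs <;> omega
        · rw [hck, halt0]
          rw [if_neg (by omega)] at hdsucc
          rw [hdsucc]
          simp only [max_def]
          split_ifs <;> omega
      · split_ifs with hcond
        · rw [getD_set c k _ i (by omega), if_neg (by omega)]
          exact h2 i hi (by omega)
        · exact h2 i hi (by omega)

theorem ones_getD (s : List Int) (i : Nat) (hi : i < s.length) :
    ((PySem.List.pyRange 0 (s.length : Int) 1).map (fun _ => (1 : Int))).getD i 0 = 1 := by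
  have hl : ((PySem.List.pyRange 0 (s.length : Int) 1).map (fun _ => (1 : Int))).length = s.length := by
    simp [PySem.List.length_pyRange_one]
  rw [List.getD_eq_getElem _ _ (by omega), List.getElem_map]

theorem solution_eq_altOld (s : List Int) : solution s = altOld s := by
  rcases Nat.eq_zero_or_pos s.length with hs | hn
  · have hnil : s = [] := List.length_eq_zero_iff.mp hs
    subst hnil
    decide
  · have hnnil : s ≠ [] := List.length_pos_iff.mp hn
    have hlo : ((PySem.List.pyRange 0 (s.length : Int) 1).map (fun _ => (1 : Int))).length = s.length := by
      simp [PySem.List.length_pyRange_one]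
    have hfwd : (PySem.List.pyRange 0 ((s.length : Int) - 1) 1).foldl (fwdStep s)
        ((PySem.List.pyRange 0 (s.length : Int) 1).map (fun _ => (1 : Int))) = runs s := by
      have := fwd_loop s (s.length - 1) 0
        ((PySem.List.pyRange 0 (s.length : Int) 1).map (fun _ => (1 : Int)))
        (by omega) hlo
        (fun i hi hik => by
          have hi0 : i = 0 := by omega
          subst hi0
          rw [ones_getD s 0 hn, runs_zero s hnnil])
        (fun i hi _ => ones_getD s i hi)
      simpa using this
    have hbwd : (PySem.List.pyRange ((s.length : Int) - 2) (-1) (-1)).foldl (bwdStep s)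
        (runs s) = altOld s := by
      have := bwd_loop s (s.length - 1) (runs s) (by omega) (length_runs s)
        (fun i hi _ => rfl)
        (fun i hi hik => by
          have hieq : i = s.length - 1 := by omega
          subst hieq
          rw [altOld_getD s _ hi, down_last s hn]
          exact (max_eq_left (runs_ge_one s _ hi)).symm)
      have hc2 : ((s.length - 1 : Nat) : Int) - 1 = (s.length : Int) - 2 := by omega
      rwa [hc2] at this
    show (PySem.List.pyRange ((s.length : Int) - 2) (-1) (-1)).foldl (bwdStep s)
        ((PySem.List.pyRange 0 ((s.length : Int) - 1) 1).foldl (fwdStep s)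
          ((PySem.List.pyRange 0 (s.length : Int) 1).map (fun _ => (1 : Int)))) = altOld s
    rw [hfwd, hbwd]

-- bridge: the forward run table agrees with B's per-index recursion upB
theorem runs_eq_upB (s : List Int) : ∀ i : Nat, i < s.length → (runs s).getD i 0 = upB s i := by
  intro i
  induction i with
  | zero => intro h; rw [runs_zero s (List.length_pos_iff.mp h)]; rfl
  | succ j ih =>
    intro h
    rw [runs_succ s j h, upB]
    split_ifs with hc
    · rw [ih (by omega)]
    · rfl

-- bridge: the backward run table agrees with B's per-index recursion downB
theorem down_eq_downB (s : List Int) : ∀ (d i : Nat), i < s.length → s.length - 1 - i = d →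
    ((runs s.reverse).reverse).getD i 0 = downB s i := by
  intro d
  induction d with
  | zero =>
    intro i hi hd
    have : i = s.length - 1 := by omega
    subst this
    rw [down_last s (by omega), downB, dif_neg (by omega)]
  | succ d ih =>
    intro i hi hd
    have h1 : i + 1 < s.length := by omega
    rw [down_succ s i h1, downB]
    by_cases hc : s.getD i 0 > s.getD (i + 1) 0
    · rw [if_pos hc, dif_pos ⟨h1, hc⟩, ih (i + 1) h1 (by omega)]
    · rw [if_neg hc, dif_neg (by omega)]

theorem altOld_eq_alt (s : List Int) : altOld s = solution_alt s := by
  have hl : (solution_alt s).length = s.length := by simp [solution_alt]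
  apply eq_of_getD _ _ (by rw [altOld_length, hl])
  intro i hi
  rw [altOld_length] at hi
  rw [altOld_getD s i hi, runs_eq_upB s i hi,
      down_eq_downB s (s.length - 1 - i) i hi rfl]
  rw [solution_alt, List.getD_eq_getElem _ _ (by simpa using hi), List.getElem_map,
      List.getElem_range]

-- ===== VERDICT (by name: the statement is the Claim_ definition above) =====
theorem solution_spec : Claim_equal_solution := by
  intro s _
  show solution s = solution_alt s
  rw [solution_eq_altOld, altOld_eq_alt]
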